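-- pv_equiv track=rewrite | github.com/vperdomo2001/gmt-analytics | ClientAnalysis.py | extract_tier
-- ===== SOURCE A (Python) =====
-- def extract_tier(label_str):
--     label_str = str(label_str)
--     # skip invalid entries
--     if label_str.lower() == 'nan' or label_str.strip() == '':
--         return None
--     # go through labels and create list of labels
--     labels = [label.strip() for label in label_str.split(',')]
--     for label in labels:
--         if 'tier' in label.lower():
--             return label
--     # Special case: sliding scale
--     if any('sliding scale' in label.lower() for label in labels):
--         return 'Sliding Scale'
-- ===== SOURCE B (Python) =====
-- def extract_tier(label_str):
--     label_str = str(label_str)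
--     if label_str.lower() == 'nan' or label_str.strip() == '':
--         return None
--     sliding = None
--     for part in label_str.split(','):
--         label = part.strip()
--         low = label.lower()
--         if 'tier' in low:
--             return label
--         if 'sliding scale' in low:
--             sliding = 'Sliding Scale'
--     return sliding
-- ===== Notes on version B (the rewrite author's own statement) =====
-- stated objective: simpler
-- what changed: Fuses A's three passes (a strip-comprehension, a tier for-loop, and an any() sliding-scale scan) into one loop over the raw split parts that strips/lowers each part once and keeps a single 'sliding' accumulator, returning immediately on a tier match.
import Mathlib
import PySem

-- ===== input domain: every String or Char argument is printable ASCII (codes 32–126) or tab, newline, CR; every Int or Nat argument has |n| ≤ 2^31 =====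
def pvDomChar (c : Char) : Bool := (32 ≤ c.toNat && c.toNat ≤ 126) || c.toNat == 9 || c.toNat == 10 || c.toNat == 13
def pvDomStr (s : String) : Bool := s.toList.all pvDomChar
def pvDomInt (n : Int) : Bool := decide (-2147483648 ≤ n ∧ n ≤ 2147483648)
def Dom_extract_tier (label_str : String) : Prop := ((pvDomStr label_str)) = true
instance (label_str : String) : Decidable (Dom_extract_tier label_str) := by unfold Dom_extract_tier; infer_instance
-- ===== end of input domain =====

-- B fuses A's three passes over the labels into one single-pass loop with a 'sliding' accumulator; objective: simpler.


-- ===== PORT A =====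
-- the 'for label in labels: if 'tier' in label.lower(): return label' loop
def extractTierLoopA : List String → Option String
  | [] => none
  | l :: rest =>
    if PySem.Str.isIn "tier" (PySem.Str.lower l) then some l else extractTierLoopA rest

-- str(label_str) is the identity on a str argument; s.split(',') via split? is exact since "," ≠ ""
def extract_tier (label_str : String) : Option String :=
  if PySem.Str.lower label_str == "nan" || PySem.Str.strip label_str == "" then none
  else
    let labels := ((PySem.Str.split? label_str ",").getD []).map PySem.Str.strip
    match extractTierLoopA labels with
    | some l => some l
    | none =>
      if labels.any (fun l => PySem.Str.isIn "sliding scale" (PySem.Str.lower l)) then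
        some "Sliding Scale"
      else none

-- ===== PORT B =====
-- single pass over the raw split parts, with a 'sliding' accumulator
def extractTierLoopB : List String → Option String → Option String
  | [], sliding => sliding
  | p :: rest, sliding =>
    if PySem.Str.isIn "tier" (PySem.Str.lower (PySem.Str.strip p)) then
      some (PySem.Str.strip p)
    else if PySem.Str.isIn "sliding scale" (PySem.Str.lower (PySem.Str.strip p)) then
      extractTierLoopB rest (some "Sliding Scale")
    else extractTierLoopB rest sliding

def extract_tier_alt (label_str : String) : Option String :=
  if PySem.Str.lower label_str == "nan" || PySem.Str.strip label_str == "" then none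
  else extractTierLoopB ((PySem.Str.split? label_str ",").getD []) none

-- ===== PRECONDITION & SPEC =====
def Spec_extract_tier (label_str : String) (out : Option String) : Prop := out = extract_tier_alt label_str
instance (label_str : String) (out : Option String) : Decidable (Spec_extract_tier label_str out) := by unfold Spec_extract_tier; infer_instance

-- ===== CLAIM (what is proved, stated in full; the proofs are below) =====
def Claim_equal_extract_tier : Prop := ∀ (label_str : String), Dom_extract_tier label_str → Spec_extract_tier label_str (extract_tier label_str)

-- ===== LEMMAS AND PROOFS =====

-- the fused loop B equals A's tier loop followed by the any() check, for either reachable accumulator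
theorem extractTierLoopB_eq (ls : List String) (sliding : Option String)
    (h : sliding = none ∨ sliding = some "Sliding Scale") :
    extractTierLoopB ls sliding =
      match extractTierLoopA (ls.map PySem.Str.strip) with
      | some l => some l
      | none =>
        if (ls.map PySem.Str.strip).any
            (fun l => PySem.Str.isIn "sliding scale" (PySem.Str.lower l)) then
          some "Sliding Scale"
        else sliding := by
  induction ls generalizing sliding with
  | nil =>
    simp only [extractTierLoopB, extractTierLoopA, List.map_nil, List.any_nil,
      Bool.false_eq_true, if_false]
  | cons p rest ih =>
    simp only [extractTierLoopB, extractTierLoopA, List.map_cons, List.any_cons]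
    by_cases ht : PySem.Str.isIn "tier" (PySem.Str.lower (PySem.Str.strip p)) = true
    · simp only [ht, if_true]
    · simp only [ht, Bool.false_eq_true, if_false]
      by_cases hs : PySem.Str.isIn "sliding scale" (PySem.Str.lower (PySem.Str.strip p)) = true
      · simp only [hs, if_true, Bool.true_or]
        rw [ih _ (Or.inr rfl)]
        cases extractTierLoopA (rest.map PySem.Str.strip) with
        | none => simp only [ite_self]
        | some v => rfl
      · simp only [hs, Bool.false_eq_true, if_false, Bool.false_or]
        exact ih _ h

-- ===== VERDICT (by name: the statement is the Claim_ definition above) =====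
theorem extract_tier_spec : Claim_equal_extract_tier := by
  intro s _
  unfold Spec_extract_tier extract_tier extract_tier_alt
  by_cases hg : (PySem.Str.lower s == "nan" || PySem.Str.strip s == "") = true
  · simp only [hg, if_true]
  · simp only [hg, Bool.false_eq_true, if_false]
    rw [extractTierLoopB_eq _ none (Or.inl rfl)]
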